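-- pv_equiv track=rewrite | github.com/prratek/tap-stripe | tap_stripe/tests/test_schemas.py | _field_type_is_valid
-- ===== SOURCE A (Python) =====
-- from typing import Dict, List, Union
--
-- SCHEMA_FIELD_TYPES = ["object", "array", "string", "number", "null"]
--
-- def _field_type_is_valid(field_type: List[str]) -> bool:
--     # field type must be a list
--     if not isinstance(field_type, list):
--         return False
--     # types in the list should be unique
--     if len(field_type) > len(set(field_type)):
--         return False
--     # check that each element in the list is an accepted "type"
--     for type_val in field_type:
--         if type_val not in SCHEMA_FIELD_TYPES:
--             return False
--     return True
-- ===== SOURCE B (Python) =====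
-- SCHEMA_FIELD_TYPES = ["object", "array", "string", "number", "null"]
--
-- def _field_type_is_valid(field_type):
--     # Inverted strategy: instead of scanning the input for membership/duplicates,
--     # iterate over the allowed vocabulary and count occurrences of each allowed
--     # type in the input. Valid iff the counts account for every element (so no
--     # foreign types) and no allowed type occurs more than once (so no duplicates).
--     if not isinstance(field_type, list):
--         return False
--     counts = [field_type.count(t) for t in SCHEMA_FIELD_TYPES]
--     return sum(counts) == len(field_type) and all(c <= 1 for c in counts)
-- ===== Notes on version B (the rewrite author's own statement) =====
-- stated objective: alternative
-- what changed: A builds a set of the input and compares lengths, then scans the input testing membership in the allowed list; B inverts the iteration: it loops over the fixed allowed vocabulary counting occurrences of each allowed type in the input, and accepts iff the counts sum to len(field_type) and each count is at most 1 (no sets, no membership scan over the input).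
import Mathlib
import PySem

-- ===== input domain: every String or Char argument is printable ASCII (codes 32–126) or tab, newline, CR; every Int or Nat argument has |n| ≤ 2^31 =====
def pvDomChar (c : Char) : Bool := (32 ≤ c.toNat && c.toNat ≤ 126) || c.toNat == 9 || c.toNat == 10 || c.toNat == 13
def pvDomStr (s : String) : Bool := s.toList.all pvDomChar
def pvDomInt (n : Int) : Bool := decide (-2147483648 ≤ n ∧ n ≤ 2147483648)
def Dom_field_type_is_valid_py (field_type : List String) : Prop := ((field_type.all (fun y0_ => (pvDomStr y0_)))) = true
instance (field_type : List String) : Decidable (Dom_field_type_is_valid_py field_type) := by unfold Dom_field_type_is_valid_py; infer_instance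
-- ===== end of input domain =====

-- B inverts the iteration: instead of a set of the input plus a membership scan, it counts
-- occurrences of each ALLOWED type in the input and accepts iff counts sum to the length
-- and each count is at most 1 (alternative algorithm, same cost).
-- ===== PORT A =====
def pvSchemaFieldTypes : List String := ["object", "array", "string", "number", "null"]

-- the 'for type_val in field_type: if type_val not in SCHEMA_FIELD_TYPES: return False' loop
def pvCheckTypes : List String → Bool
  | [] => true
  | type_val :: rest =>
      if type_val ∈ pvSchemaFieldTypes then pvCheckTypes rest else false

def field_type_is_valid_py (field_type : List String) : Bool :=
  -- isinstance(field_type, list) is always true under the type convention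
  if field_type.length > (PySem.Set.ofList field_type).length then false
  else pvCheckTypes field_type

-- ===== PORT B =====
def field_type_is_valid_py_alt (field_type : List String) : Bool :=
  let counts := pvSchemaFieldTypes.map (fun t => PySem.List.count field_type t)
  (counts.sum == field_type.length) && counts.all (fun c => c ≤ 1)

-- ===== PRECONDITION & SPEC =====
def Spec_field_type_is_valid_py (field_type : List String) (out : Bool) : Prop := out = field_type_is_valid_py_alt field_type
instance (field_type : List String) (out : Bool) : Decidable (Spec_field_type_is_valid_py field_type out) := by unfold Spec_field_type_is_valid_py; infer_instance

-- ===== CLAIM (what is proved, stated in full; the proofs are below) =====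
def Claim_equal_field_type_is_valid_py : Prop := ∀ (field_type : List String), Dom_field_type_is_valid_py field_type → Spec_field_type_is_valid_py field_type (field_type_is_valid_py field_type)

-- ===== LEMMAS AND PROOFS =====

lemma pvCheckTypes_iff (l : List String) :
    pvCheckTypes l = true ↔ ∀ t ∈ l, t ∈ pvSchemaFieldTypes := by
  induction l with
  | nil => simp [pvCheckTypes]
  | cons a l ih => by_cases h : a ∈ pvSchemaFieldTypes <;> simp [pvCheckTypes, h, ih]

lemma pvFoldl_add_length_le (l : List String) (s : PySem.Set String) :
    (l.foldl PySem.Set.add s).length ≤ s.length + l.length := by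
  induction l generalizing s with
  | nil => simp
  | cons a l ih =>
    simp only [List.foldl_cons, List.length_cons]
    refine le_trans (ih _) ?_
    by_cases h : PySem.Set.contains s a
    · simp only [PySem.Set.add, h, if_true]; omega
    · simp only [PySem.Set.add, h, Bool.false_eq_true, if_false, List.length_append,
        List.length_cons, List.length_nil]
      omega

lemma pvFoldl_add_length_eq_iff (l : List String) (s : PySem.Set String) :
    (l.foldl PySem.Set.add s).length = s.length + l.length ↔
      l.Nodup ∧ ∀ x ∈ l, x ∉ s := by
  induction l generalizing s with
  | nil => simp
  | cons a l ih =>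
    simp only [List.foldl_cons]
    by_cases h : PySem.Set.contains s a
    · have hmem : a ∈ s := by simpa [PySem.Set.contains] using h
      have hs : s.add a = s := by simp [PySem.Set.add, hmem]
      rw [hs]
      have hle := pvFoldl_add_length_le l s
      constructor
      · intro he
        simp only [List.length_cons] at he
        omega
      · rintro ⟨-, hall⟩
        exact absurd hmem (hall a (by simp))
    · have hmem : a ∉ s := by simpa [PySem.Set.contains] using h
      have hs : s.add a = s ++ [a] := by simp [PySem.Set.add, hmem]
      rw [hs]
      have hIH := ih (s ++ [a])
      constructor
      · intro he
        have he' : (l.foldl PySem.Set.add (s ++ [a])).length = (s ++ [a]).length + l.length := by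
          simp only [List.length_append, List.length_cons, List.length_nil] at he ⊢
          omega
        obtain ⟨hnd, hall⟩ := hIH.mp he'
        refine ⟨List.nodup_cons.mpr ⟨fun hal => (hall a hal) (by simp), hnd⟩, ?_⟩
        intro x hx
        rcases List.mem_cons.mp hx with rfl | hx
        · exact hmem
        · exact fun hxs => hall x hx (by simp [hxs])
      · rintro ⟨hnd, hall⟩
        obtain ⟨hanl, hndl⟩ := List.nodup_cons.mp hnd
        have he' := hIH.mpr ⟨hndl, fun x hx => by
          simp only [List.mem_append, List.mem_singleton]
          rintro (hxs | rfl)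
          · exact hall x (by simp [hx]) hxs
          · exact hanl hx⟩
        simp only [List.length_append, List.length_cons, List.length_nil] at he' ⊢
        omega

lemma pvOfList_length_iff (l : List String) :
    (PySem.Set.ofList l).length = l.length ↔ l.Nodup := by
  have h := pvFoldl_add_length_eq_iff l PySem.Set.empty
  simpa [PySem.Set.ofList, PySem.Set.empty] using h

-- A = true ↔ nodup ∧ every element allowed
lemma pvA_iff (l : List String) :
    field_type_is_valid_py l = true ↔ l.Nodup ∧ ∀ t ∈ l, t ∈ pvSchemaFieldTypes := by
  unfold field_type_is_valid_py
  have hle : (PySem.Set.ofList l).length ≤ l.length := by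
    simpa [PySem.Set.ofList, PySem.Set.empty] using pvFoldl_add_length_le l PySem.Set.empty
  by_cases hnd : l.Nodup
  · have hlen := (pvOfList_length_iff l).mpr hnd
    rw [if_neg (by omega)]
    simp [pvCheckTypes_iff, hnd]
  · have hne : (PySem.Set.ofList l).length ≠ l.length :=
      fun he => hnd ((pvOfList_length_iff l).mp he)
    rw [if_pos (by omega)]
    simp [hnd]

-- the vocabulary's counts sum to the number of allowed elements of l
lemma pvSum_counts (l : List String) :
    (pvSchemaFieldTypes.map (fun t => PySem.List.count l t)).sum
      = l.countP (fun x => decide (x ∈ pvSchemaFieldTypes)) := by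
  induction l with
  | nil => simp [PySem.List.count_eq]
  | cons a l ih =>
    simp only [PySem.List.count_eq] at ih ⊢
    rw [List.countP_cons]
    by_cases h : a ∈ pvSchemaFieldTypes
    · fin_cases h <;>
        · simp_all [List.count_cons, pvSchemaFieldTypes]; omega
    · have h1 : ∀ t ∈ pvSchemaFieldTypes, (a :: l).count t = l.count t := by
        intro t ht
        rw [List.count_cons]
        have hne : ¬ a = t := fun he => h (by rw [he]; exact ht)
        simp [hne]
      rw [List.map_congr_left (by intro t ht; exact h1 t ht), ih]
      simp [h]

-- B = true ↔ nodup ∧ every element allowed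
lemma pvB_iff (l : List String) :
    field_type_is_valid_py_alt l = true ↔ l.Nodup ∧ ∀ t ∈ l, t ∈ pvSchemaFieldTypes := by
  unfold field_type_is_valid_py_alt
  simp only [Bool.and_eq_true, beq_iff_eq, List.all_eq_true, List.mem_map,
    forall_exists_index, and_imp, pvSum_counts]
  constructor
  · rintro ⟨hsum, hcnt⟩
    have hall : ∀ t ∈ l, t ∈ pvSchemaFieldTypes := by
      intro t ht
      by_contra hnt
      have := List.countP_eq_length.mp hsum t ht
      simp [hnt] at this
    refine ⟨List.nodup_iff_count_le_one.mpr ?_, hall⟩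
    intro a
    by_cases ha : a ∈ pvSchemaFieldTypes
    · have := hcnt _ a ha rfl
      simpa [PySem.List.count_eq] using this
    · have : l.count a = 0 := List.count_eq_zero.mpr (fun hal => ha (hall a hal))
      omega
  · rintro ⟨hnd, hall⟩
    refine ⟨List.countP_eq_length.mpr (fun t ht => by simp [hall t ht]), ?_⟩
    rintro c t ht rfl
    simpa [PySem.List.count_eq] using List.nodup_iff_count_le_one.mp hnd t

-- ===== VERDICT (by name: the statement is the Claim_ definition above) =====
theorem field_type_is_valid_py_spec : Claim_equal_field_type_is_valid_py := by
  intro ft _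
  unfold Spec_field_type_is_valid_py
  cases hA : field_type_is_valid_py ft with
  | true => exact ((pvB_iff ft).mpr ((pvA_iff ft).mp hA)).symm
  | false =>
    cases hB : field_type_is_valid_py_alt ft with
    | false => rfl
    | true =>
      rw [(pvA_iff ft).mpr ((pvB_iff ft).mp hB)] at hA
      exact absurd hA (by simp)
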